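-- pv_equiv track=rewrite | github.com/pc5401/my_BOJ | 백준/Silver/17207. 돌려막기/돌려막기.py | solve
-- ===== SOURCE A (Python) =====
-- def solve(A: list[list[int]], B: list[list[int]]) -> str:
--     total = []
--     for x in range(5):
--         t = 0
--         for y in range(5):
--             s = 0
--             for i in range(5):
--                 s += A[x][i] * B[i][y]
--             t += s
--         total.append(t)
--
--     # 최소
--     mn = min(total)
--     names = ["Inseo", "Junsuk", "Jungwoo", "Jinwoo", "Youngki"]
--     # 우선순위
--     priority = ["Youngki", "Jinwoo", "Jungwoo", "Junsuk", "Inseo"]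
--     candidates = [names[i] for i, v in enumerate(total) if v == mn]
--
--     for p in priority:
--         if p in candidates:
--             return p
-- ===== SOURCE B (Python) =====
-- def solve(A: list[list[int]], B: list[list[int]]) -> str:
--     # Precompute the row sums of B, then each total is a single dot product;
--     # pick the minimum by scanning indices from 4 down to 0 (= the priority order).
--     rs = [sum(row[:5]) for row in B[:5]]
--     total = [sum(A[x][i] * rs[i] for i in range(5)) for x in range(5)]
--     mn = min(total)
--     names = ["Inseo", "Junsuk", "Jungwoo", "Jinwoo", "Youngki"]
--     for i in range(4, -1, -1):
--         if total[i] == mn: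
--             return names[i]
-- ===== Notes on version B (the rewrite author's own statement) =====
-- stated objective: alternative
-- what changed: Replaces the triple nested multiply loop by precomputed row sums of B followed by one dot product per row of A (25 instead of 125 multiplications), and replaces the candidates-list-plus-priority-membership selection by a single reverse index scan for the minimum.
import Mathlib
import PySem

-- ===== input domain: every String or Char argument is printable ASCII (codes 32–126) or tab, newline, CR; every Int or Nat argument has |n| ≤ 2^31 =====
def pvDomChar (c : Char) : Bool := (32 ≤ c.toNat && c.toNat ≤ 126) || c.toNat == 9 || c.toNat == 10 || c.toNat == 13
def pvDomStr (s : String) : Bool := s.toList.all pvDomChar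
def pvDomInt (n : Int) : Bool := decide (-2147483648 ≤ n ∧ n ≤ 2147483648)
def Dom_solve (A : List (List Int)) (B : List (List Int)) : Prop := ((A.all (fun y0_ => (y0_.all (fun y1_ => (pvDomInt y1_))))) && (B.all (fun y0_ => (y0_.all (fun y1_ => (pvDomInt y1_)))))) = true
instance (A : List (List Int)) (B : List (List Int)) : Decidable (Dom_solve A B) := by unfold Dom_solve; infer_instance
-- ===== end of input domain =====

-- B precomputes the row sums of B and does one dot product per row of A, and selects
-- the minimum by a reverse index scan instead of a candidates list + priority membership scan.

def namesL : List String := ["Inseo", "Junsuk", "Jungwoo", "Jinwoo", "Youngki"]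
def priorityL : List String := ["Youngki", "Jinwoo", "Jungwoo", "Junsuk", "Inseo"]

-- ===== PORT A =====
-- the triple nested loop building `total`
def solveTotalsA (A B : List (List Int)) : List Int :=
  (PySem.List.pyRange 0 5 1).foldl (fun total x =>
    total ++ [(PySem.List.pyRange 0 5 1).foldl (fun t y =>
      t + (PySem.List.pyRange 0 5 1).foldl (fun s i =>
        s + (PySem.List.pyGetD (PySem.List.pyGetD A x []) i 0)
              * (PySem.List.pyGetD (PySem.List.pyGetD B i []) y 0)) 0) 0]) []

-- min / candidates / priority scan of A (returns "" if the loop falls through, unreachable)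
def selA (total : List Int) : String :=
  let mn := (PySem.List.min? total (fun v => v)).getD 0
  let candidates := (PySem.List.enumerate total 0).foldl
    (fun acc iv => if iv.2 = mn then acc ++ [PySem.List.pyGetD namesL iv.1 ""] else acc) []
  match priorityL.find? (fun p => candidates.contains p) with
  | some p => p
  | none => ""

def solve (A : List (List Int)) (B : List (List Int)) : String :=
  selA (solveTotalsA A B)

-- ===== PORT B =====
-- rs = [sum(row[:5]) for row in B[:5]]; total[x] = dot(A[x], rs)
def solveTotalsB (A B : List (List Int)) : List Int :=
  let rs := (PySem.List.slice B (some 0) (some 5)).map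
    (fun row => (PySem.List.slice row (some 0) (some 5)).foldl (· + ·) 0)
  (PySem.List.pyRange 0 5 1).map (fun x =>
    (PySem.List.pyRange 0 5 1).foldl (fun s i =>
      s + (PySem.List.pyGetD (PySem.List.pyGetD A x []) i 0) * (PySem.List.pyGetD rs i 0)) 0)

-- for i in range(4, -1, -1): if total[i] == mn: return names[i]
def selB (total : List Int) : String :=
  let mn := (PySem.List.min? total (fun v => v)).getD 0
  match (PySem.List.pyRange 4 (-1) (-1)).find? (fun i => PySem.List.pyGetD total i 0 == mn) with
  | some i => PySem.List.pyGetD namesL i ""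
  | none => ""

def solve_alt (A : List (List Int)) (B : List (List Int)) : String :=
  selB (solveTotalsB A B)

-- ===== PRECONDITION & SPEC =====
-- A indexes A[x][i] and B[i][y] for x,y,i < 5 and raises IndexError otherwise.
def Pre_solve (A : List (List Int)) (B : List (List Int)) : Prop :=
  5 ≤ A.length ∧ 5 ≤ B.length ∧ (∀ r ∈ A.take 5, 5 ≤ r.length) ∧ (∀ r ∈ B.take 5, 5 ≤ r.length)
instance (A : List (List Int)) (B : List (List Int)) : Decidable (Pre_solve A B) := by
  unfold Pre_solve; infer_instance

def pvWitness_solve : List (List Int) × List (List Int) :=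
  ([[0,0,0,0,0],[0,0,0,0,0],[0,0,0,0,0],[0,0,0,0,0],[0,0,0,0,0]],
   [[0,0,0,0,0],[0,0,0,0,0],[0,0,0,0,0],[0,0,0,0,0],[0,0,0,0,0]])

def Spec_solve (A : List (List Int)) (B : List (List Int)) (out : String) : Prop := out = solve_alt A B
instance (A : List (List Int)) (B : List (List Int)) (out : String) : Decidable (Spec_solve A B out) := by unfold Spec_solve; infer_instance

-- ===== CLAIM (what is proved, stated in full; the proofs are below) =====
def Claim_equal_solve : Prop := ∀ (A : List (List Int)) (B : List (List Int)), Dom_solve A B → Pre_solve A B → Spec_solve A B (solve A B)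

-- ===== LEMMAS AND PROOFS =====

lemma ex5 {α : Type} (l : List α) (h : 5 ≤ l.length) :
    ∃ x0 x1 x2 x3 x4 t, l = x0 :: x1 :: x2 :: x3 :: x4 :: t := by
  match l, h with
  | x0 :: x1 :: x2 :: x3 :: x4 :: t, _ => exact ⟨x0, x1, x2, x3, x4, t, rfl⟩

set_option maxHeartbeats 2000000 in
lemma totals_eq (A B : List (List Int)) (hA : 5 ≤ A.length) (hB : 5 ≤ B.length)
    (hAr : ∀ r ∈ A.take 5, 5 ≤ r.length) (hBr : ∀ r ∈ B.take 5, 5 ≤ r.length) :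
    solveTotalsA A B = solveTotalsB A B := by
  obtain ⟨a0, a1, a2, a3, a4, At, rfl⟩ := ex5 A hA
  obtain ⟨b0, b1, b2, b3, b4, Bt, rfl⟩ := ex5 B hB
  obtain ⟨a00,a01,a02,a03,a04,t0,rfl⟩ := ex5 a0 (hAr _ (by simp))
  obtain ⟨a10,a11,a12,a13,a14,t1,rfl⟩ := ex5 a1 (hAr _ (by simp))
  obtain ⟨a20,a21,a22,a23,a24,t2,rfl⟩ := ex5 a2 (hAr _ (by simp))
  obtain ⟨a30,a31,a32,a33,a34,t3,rfl⟩ := ex5 a3 (hAr _ (by simp))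
  obtain ⟨a40,a41,a42,a43,a44,t4,rfl⟩ := ex5 a4 (hAr _ (by simp))
  obtain ⟨b00,b01,b02,b03,b04,u0,rfl⟩ := ex5 b0 (hBr _ (by simp))
  obtain ⟨b10,b11,b12,b13,b14,u1,rfl⟩ := ex5 b1 (hBr _ (by simp))
  obtain ⟨b20,b21,b22,b23,b24,u2,rfl⟩ := ex5 b2 (hBr _ (by simp))
  obtain ⟨b30,b31,b32,b33,b34,u3,rfl⟩ := ex5 b3 (hBr _ (by simp))
  obtain ⟨b40,b41,b42,b43,b44,u4,rfl⟩ := ex5 b4 (hBr _ (by simp))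
  simp [solveTotalsA, solveTotalsB, PySem.List.pyRange, List.range_succ,
    PySem.List.pyGetD_ofNat', PySem.List.slice, List.foldl, List.map]
  and_intros <;> ring

set_option maxHeartbeats 2000000 in
lemma sel_eq_len (L : List Int) (h : L.length = 5) : selA L = selB L := by
  obtain ⟨t0, t1, t2, t3, t4, t, rfl⟩ := ex5 L (by omega)
  have ht : t = [] := by simpa using h
  subst ht
  simp only [selA, selB]
  rw [show PySem.List.pyRange 4 (-1) (-1) = [4, 3, 2, 1, 0] from by decide]
  set m := (PySem.List.min? [t0, t1, t2, t3, t4] (fun v => v)).getD 0 with hm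
  by_cases h0 : t0 = m <;> by_cases h1 : t1 = m <;> by_cases h2 : t2 = m <;>
    by_cases h3 : t3 = m <;> by_cases h4 : t4 = m <;>
    simp [h0, h1, h2, h3, h4, PySem.List.enumerate_cons, List.foldl, List.find?_nil,
      PySem.List.pyGetD_ofNat', namesL, priorityL]

lemma lenTotalsB (A B : List (List Int)) : (solveTotalsB A B).length = 5 := rfl

-- ===== VERDICT (by name: the statement is the Claim_ definition above) =====
theorem solve_spec : Claim_equal_solve := by
  intro A B _ hpre
  obtain ⟨hA, hB, hAr, hBr⟩ := hpre
  show solve A B = solve_alt A B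
  unfold solve solve_alt
  rw [totals_eq A B hA hB hAr hBr]
  exact sel_eq_len _ (lenTotalsB A B)
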